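-- pv_equiv track=rewrite | github.com/laze44/distIR | mercury/search/topology_policy.py | _ordered_divisor_pairs
-- ===== SOURCE A (Python) =====
-- from typing import Dict, List, Optional, Tuple
--
-- def _ordered_divisor_pairs(n: int) -> List[Tuple[int, int]]:
--     """Return all (a, b) with a * b == n, a >= b >= 1, sorted by a descending."""
--     pairs: List[Tuple[int, int]] = []
--     i = 1
--     while i * i <= n:
--         if n % i == 0:
--             pairs.append((n // i, i))
--         i += 1
--     return pairs
-- ===== SOURCE B (Python) =====
-- from typing import Dict, List, Optional, Tuple
--
-- def _ordered_divisor_pairs(n: int) -> List[Tuple[int, int]]: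
--     """Return all (a, b) with a * b == n, a >= b >= 1, sorted by a descending."""
--     if n <= 0:
--         return []
--     # 1) prime-factorize n, dividing each found prime out of m
--     m = n
--     fac: List[Tuple[int, int]] = []
--     p = 2
--     while p * p <= m:
--         if m % p == 0:
--             e = 0
--             while m % p == 0:
--                 m //= p
--                 e += 1
--             fac.append((p, e))
--         p += 1
--     if m > 1:
--         fac.append((m, 1))
--     # 2) generate every divisor of n as a product of prime powers
--     divs = [1]
--     for p, e in fac:
--         divs = [d * p ** k for d in divs for k in range(e + 1)]
--     # 3) keep the small member b of each pair, ascending, and attach its cofactor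
--     small = sorted(d for d in divs if d * d <= n)
--     return [(n // b, b) for b in small]
-- ===== Notes on version B (the rewrite author's own statement) =====
-- stated objective: alternative
-- what changed: Instead of A's direct trial-division scan that appends (n//i, i) for every small divisor i with i*i <= n, B prime-factorizes n (dividing each prime out of a shrinking cofactor), generates all divisors as products of prime powers from the factorization, sorts the small members b (b*b <= n) ascending and attaches each cofactor n//b.
import Mathlib
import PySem

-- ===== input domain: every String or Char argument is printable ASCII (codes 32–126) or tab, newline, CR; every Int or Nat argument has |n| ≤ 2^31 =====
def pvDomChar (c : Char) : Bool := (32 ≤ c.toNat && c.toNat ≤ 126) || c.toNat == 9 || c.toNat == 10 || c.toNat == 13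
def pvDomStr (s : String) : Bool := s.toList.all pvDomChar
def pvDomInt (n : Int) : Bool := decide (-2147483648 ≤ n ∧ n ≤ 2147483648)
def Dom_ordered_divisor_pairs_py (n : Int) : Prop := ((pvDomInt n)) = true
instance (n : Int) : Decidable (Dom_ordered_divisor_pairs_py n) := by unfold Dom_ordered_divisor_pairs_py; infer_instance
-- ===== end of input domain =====

-- B replaces A's direct trial-division scan by prime factorization of n followed by
-- divisor generation from the factorization and a sort of the small members (alternative).

-- ===== PORT A =====
def pvLoopA (n i : Int) (pairs : List (Int × Int)) : List (Int × Int) :=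
  if h : i * i ≤ n then
    pvLoopA n (i + 1)
      (if PySem.Int.mod n i == 0 then pairs ++ [(PySem.Int.floordiv n i, i)] else pairs)
  else pairs
termination_by (n + 1 - i).toNat
decreasing_by
  have hii : i ≤ i * i := by
    by_cases h' : i ≤ 0
    · exact h'.trans (mul_self_nonneg i)
    · exact le_mul_of_one_le_left (by omega) (by omega)
  have hin : i ≤ n := le_trans hii h
  omega

def ordered_divisor_pairs_py (n : Int) : List (Int × Int) :=
  pvLoopA n 1 []

-- ===== PORT B =====
-- inner 'while m % p == 0: m //= p; e += 1'; fuel is a totality guard only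
-- (m.toNat steps always suffice: m shrinks by a factor ≥ 2 each iteration)
def pvStrip (fuel : Nat) (m p e : Int) : Int × Int :=
  match fuel with
  | 0 => (m, e)
  | Nat.succ fuel =>
    if PySem.Int.mod m p == 0 then pvStrip fuel (PySem.Int.floordiv m p) p (e + 1)
    else (m, e)

-- outer 'while p * p <= m' factorization loop; produces the fac list from (m, p) on,
-- with the post-loop 'if m > 1: fac.append((m, 1))' in the exit branch; fuel is a
-- totality guard only ((m + 1 - p).toNat steps always suffice)
def pvFacLoop (fuel : Nat) (m p : Int) : List (Int × Int) :=
  match fuel with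
  | 0 => if 1 < m then [(m, 1)] else []
  | Nat.succ fuel =>
    if p * p ≤ m then
      if PySem.Int.mod m p == 0 then
        (p, (pvStrip m.toNat m p 0).2) :: pvFacLoop fuel (pvStrip m.toNat m p 0).1 (p + 1)
      else pvFacLoop fuel m (p + 1)
    else if 1 < m then [(m, 1)] else []

-- 'divs = [d * p**k for d in divs for k in range(e+1)]' folded over fac;
-- 'p ** k' is ported as p ^ k.toNat, exact since k comes from range(e+1) so 0 ≤ k
def pvExpand (divs : List Int) (fac : List (Int × Int)) : List Int :=
  fac.foldl
    (fun ds pe =>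
      ds.flatMap (fun d => (PySem.List.pyRange 0 (pe.2 + 1) 1).map (fun k => d * pe.1 ^ k.toNat)))
    divs

def ordered_divisor_pairs_py_alt (n : Int) : List (Int × Int) :=
  if n ≤ 0 then []
  else
    let fac := pvFacLoop n.toNat n 2
    let divs := pvExpand [1] fac
    let small := PySem.List.sorted (divs.filter (fun d => decide (d * d ≤ n))) (fun x => x) false
    small.map (fun b => (PySem.Int.floordiv n b, b))

-- ===== PRECONDITION & SPEC =====
def Spec_ordered_divisor_pairs_py (n : Int) (out : List (Int × Int)) : Prop := out = ordered_divisor_pairs_py_alt n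
instance (n : Int) (out : List (Int × Int)) : Decidable (Spec_ordered_divisor_pairs_py n out) := by unfold Spec_ordered_divisor_pairs_py; infer_instance

-- ===== CLAIM (what is proved, stated in full; the proofs are below) =====
def Claim_equal_ordered_divisor_pairs_py : Prop := ∀ (n : Int), Dom_ordered_divisor_pairs_py n → Spec_ordered_divisor_pairs_py n (ordered_divisor_pairs_py n)

-- ===== LEMMAS AND PROOFS =====

-- accumulator lemma for A's loop
theorem pvLoopA_acc (n i : Int) (pairs : List (Int × Int)) :
    pvLoopA n i pairs = pairs ++ pvLoopA n i [] := by
  by_cases h : i * i ≤ n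
  · conv_lhs => rw [pvLoopA]
    conv_rhs => rw [pvLoopA]
    rw [dif_pos h, dif_pos h]
    rw [pvLoopA_acc n (i + 1)
        (if (PySem.Int.mod n i == 0) = true then pairs ++ [(PySem.Int.floordiv n i, i)] else pairs),
      pvLoopA_acc n (i + 1)
        (if (PySem.Int.mod n i == 0) = true then [] ++ [(PySem.Int.floordiv n i, i)] else [])]
    split <;> simp
  · conv_lhs => rw [pvLoopA]
    conv_rhs => rw [pvLoopA]
    rw [dif_neg h, dif_neg h]
    simp
termination_by (n + 1 - i).toNat
decreasing_by
  all_goals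
    have hii : i ≤ i * i := by
      by_cases h' : i ≤ 0
      · exact h'.trans (mul_self_nonneg i)
      · exact le_mul_of_one_le_left (by omega) (by omega)
    have hin : i ≤ n := le_trans hii h
    omega

-- closed form for A's loop: the filtered ascending range i..n
theorem pvLoopA_eq (n i : Int) (hi : 0 < i) :
    pvLoopA n i [] =
      ((PySem.List.pyRange i (n + 1) 1).filter
          (fun j => decide (j * j ≤ n) && (PySem.Int.mod n j == 0))).map
        (fun j => (PySem.Int.floordiv n j, j)) := by
  rw [pvLoopA]
  split
  · next h =>
    have hii : i ≤ i * i := le_mul_of_one_le_left (by omega) (by omega)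
    have hin : i ≤ n := le_trans hii h
    rw [pvLoopA_acc, pvLoopA_eq n (i + 1) (by omega)]
    rw [PySem.List.pyRange_one_cons (by omega : i < n + 1)]
    rw [List.filter_cons]
    simp only [h, decide_true, Bool.true_and]
    split <;> simp
  · next h =>
    have : ((PySem.List.pyRange i (n + 1) 1).filter
        (fun j => decide (j * j ≤ n) && (PySem.Int.mod n j == 0))) = [] := by
      rw [List.filter_eq_nil_iff]
      intro j hj
      have hj' := (PySem.List.mem_pyRange_one).mp hj
      have hjj : ¬ j * j ≤ n := by
        intro hle
        exact h (le_trans (by nlinarith [hj'.1, hi] : i * i ≤ j * j) hle)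
      simp [hjj]
    simp [this]
termination_by (n + 1 - i).toNat
decreasing_by
  have hii : i ≤ i * i := le_mul_of_one_le_left (by omega) (by omega)
  have hin : i ≤ n := le_trans hii (by assumption)
  omega

-- the strip loop (fuel-generic): pvStrip fuel m p e = (r, e + f) with m = p^f * r, p ∤ r
theorem pvStrip_spec (fuel : Nat) (m p e : Int) (hp : 2 ≤ p) (hm : 1 ≤ m)
    (hf : m.toNat ≤ fuel) :
    ∃ (f : Nat) (r : Int), pvStrip fuel m p e = (r, e + f) ∧ m = p ^ f * r ∧ 1 ≤ r ∧ ¬ p ∣ r := by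
  induction fuel generalizing m e with
  | zero => omega
  | succ fuel ih =>
    rw [pvStrip]
    split
    · next hmod =>
      have hd : p ∣ m := (PySem.Int.mod_eq_zero_iff_dvd m p).mp (by simpa using hmod)
      have hfd : PySem.Int.floordiv m p = m / p :=
        PySem.Int.floordiv_eq_ediv_of_pos (by omega : (0:Int) < p)
      have he : p * (m / p) = m := Int.mul_ediv_cancel' hd
      have h1 : 1 ≤ m / p := by nlinarith
      have h2 : m / p < m := by nlinarith
      obtain ⟨f, r, heq, hmr, hr1, hnd⟩ := ih (PySem.Int.floordiv m p) (e + 1)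
        (by rw [hfd]; exact h1)
        (by rw [hfd]; generalize hq : m / p = q at h1 h2; omega)
      refine ⟨f + 1, r, ?_, ?_, hr1, hnd⟩
      · rw [heq]; congr 1; push_cast; ring
      · rw [hfd] at hmr
        rw [pow_succ]
        nlinarith
    · next hmod =>
      have hnd : ¬ p ∣ m := fun hd =>
        hmod (by simp [(PySem.Int.mod_eq_zero_iff_dvd m p).mpr hd])
      exact ⟨0, m, by simp, by ring, hm, hnd⟩

-- expansion distributes over the seed list
theorem pvExpand_nil (divs : List Int) : pvExpand divs [] = divs := rfl

theorem pvExpand_cons (divs : List Int) (pe : Int × Int) (L : List (Int × Int)) :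
    pvExpand divs (pe :: L) =
      pvExpand (divs.flatMap
        (fun d => (PySem.List.pyRange 0 (pe.2 + 1) 1).map (fun k => d * pe.1 ^ k.toNat))) L := rfl

theorem pvExpand_distrib (L : List (Int × Int)) (divs : List Int) :
    pvExpand divs L = divs.flatMap (fun d => (pvExpand [1] L).map (fun y => d * y)) := by
  induction L generalizing divs with
  | nil => simp [pvExpand]
  | cons pe L ih =>
    have hE : pvExpand [1] (pe :: L) =
        (PySem.List.pyRange 0 (pe.2 + 1) 1).flatMap
          (fun k => (pvExpand [1] L).map (fun y => (1 * pe.1 ^ k.toNat) * y)) := by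
      rw [pvExpand_cons, ih]
      simp only [List.flatMap_cons, List.flatMap_nil, List.append_nil, List.flatMap_map]
    rw [pvExpand_cons, ih, hE]
    simp only [List.flatMap_assoc, List.flatMap_map, List.map_flatMap, List.map_map]
    congr 1
    funext d
    congr 1
    funext k
    congr 1
    funext y
    simp only [Function.comp_apply, one_mul]
    ring


-- divisors of p^f * r decompose as p^k * (divisor of r), p prime, p ∤ r
theorem pvPowMulDvd (p r c : Int) (hp2 : 2 ≤ p) (hp : Prime p) (hpr : ¬ p ∣ r) (hr : 1 ≤ r)
    (f : Nat) (hc : 1 ≤ c) :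
    c ∣ p ^ f * r ↔ ∃ k : Nat, k ≤ f ∧ ∃ y : Int, 1 ≤ y ∧ y ∣ r ∧ c = p ^ k * y := by
  constructor
  · intro h
    induction f generalizing c with
    | zero =>
      exact ⟨0, le_refl 0, c, hc, by simpa using h, by ring⟩
    | succ f ih =>
      by_cases hpc : p ∣ c
      · obtain ⟨c', rfl⟩ := hpc
        have hc' : 1 ≤ c' := by nlinarith
        have h' : c' ∣ p ^ f * r := by
          have : p * c' ∣ p * (p ^ f * r) := by
            rw [show p * (p ^ f * r) = p ^ (f + 1) * r by ring]
            exact h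
          exact (mul_dvd_mul_iff_left (by omega : p ≠ 0)).mp this
        obtain ⟨k, hk, y, hy1, hyr, hcy⟩ := ih c' hc' h'
        exact ⟨k + 1, by omega, y, hy1, hyr, by rw [hcy]; ring⟩
      · have hco : IsCoprime p c := (hp.coprime_iff_not_dvd).mpr hpc
        have hcr : c ∣ r := (hco.symm.pow_right).dvd_of_dvd_mul_left h
        exact ⟨0, by omega, c, hc, hcr, by ring⟩
  · rintro ⟨k, hk, y, hy1, hyr, rfl⟩
    exact mul_dvd_mul (pow_dvd_pow p hk) hyr

-- uniqueness of the decomposition p^k * y, p ∤ y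
theorem pvPowMulInj (p : Int) (hp2 : 2 ≤ p) {k k' : Nat} {y y' : Int}
    (hy : ¬ p ∣ y) (hy' : ¬ p ∣ y') (h : p ^ k * y = p ^ k' * y') : k = k' ∧ y = y' := by
  induction k generalizing k' with
  | zero =>
    cases k' with
    | zero => simpa using h
    | succ s =>
      exfalso
      apply hy
      rw [show y = p ^ (s + 1) * y' by simpa using h, pow_succ]
      exact ⟨p ^ s * y', by ring⟩
  | succ s ih =>
    cases k' with
    | zero =>
      exfalso
      apply hy'
      rw [show y' = p ^ (s + 1) * y by simpa using h.symm, pow_succ]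
      exact ⟨p ^ s * y, by ring⟩
    | succ s' =>
      have h' : p ^ s * y = p ^ s' * y' := by
        apply mul_left_cancel₀ (by omega : p ≠ 0)
        rw [show p * (p ^ s * y) = p ^ (s + 1) * y by ring,
          show p * (p ^ s' * y') = p ^ (s' + 1) * y' by ring]
        exact h
      obtain ⟨hk, hyy⟩ := ih h'
      exact ⟨by omega, hyy⟩

-- the loop-exit snippet 'if m > 1: fac.append((m, 1))': with no divisor of m in
-- [2, p) and m < p*p, m is 1 or prime, so its positive divisors are 1 and m
theorem pvFacLoop_exit (m p : Int) (hm : 1 ≤ m) (hp : 2 ≤ p) (hmpp : m < p * p)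
    (hnd : ∀ q, 2 ≤ q → q < p → ¬ q ∣ m) :
    (pvExpand [1] (if 1 < m then [(m, 1)] else [])).Nodup ∧
      ∀ d, d ∈ pvExpand [1] (if 1 < m then [(m, 1)] else []) ↔ (1 ≤ d ∧ d ∣ m) := by
  split
  · next hm1 =>
    have hE : pvExpand [1] [(m, 1)] = [1, m] := by
      rw [pvExpand_cons, pvExpand_nil]
      have : PySem.List.pyRange 0 (1 + 1) 1 = [0, 1] := by decide
      rw [this]
      simp
    rw [hE]
    constructor
    · refine List.nodup_cons.mpr ⟨?_, List.nodup_singleton m⟩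
      simp only [List.mem_singleton]
      omega
    · intro d
      simp only [List.mem_cons, List.not_mem_nil, or_false]
      constructor
      · rintro (rfl | rfl)
        · exact ⟨le_refl 1, one_dvd _⟩
        · exact ⟨by omega, dvd_refl _⟩
      · rintro ⟨hd1, hdm⟩
        by_contra hcon
        push_neg at hcon
        obtain ⟨hne1, hnem⟩ := hcon
        have hd2 : 2 ≤ d := by omega
        have hdlem : d ≤ m := Int.le_of_dvd (by omega) hdm
        have hdp : p ≤ d := by
          by_contra hlt
          exact hnd d hd2 (by omega) hdm
        obtain ⟨c, hc⟩ := hdm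
        have hc1 : 1 ≤ c := by nlinarith
        have hcp : c < p := by nlinarith
        have hc2 : 2 ≤ c := by
          by_contra hcc
          have : c = 1 := by omega
          rw [this, mul_one] at hc
          exact hnem hc.symm
        exact hnd c hc2 hcp ⟨d, by rw [hc]; ring⟩
  · next hm1 =>
    have : m = 1 := by omega
    subst this
    rw [pvExpand_nil]
    refine ⟨by simp, ?_⟩
    intro d
    simp only [List.mem_singleton]
    constructor
    · rintro rfl; exact ⟨le_refl 1, one_dvd 1⟩
    · rintro ⟨hd1, hdm⟩
      exact Int.eq_one_of_dvd_one (by omega) hdm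

-- invariant of the factorization loop (fuel-generic): the expanded list is
-- exactly the positive divisors of m, without duplicates
theorem pvFacLoop_spec (fuel : Nat) (m p : Int) (hm : 1 ≤ m) (hp : 2 ≤ p)
    (hnd : ∀ q, 2 ≤ q → q < p → ¬ q ∣ m) (hf : (m + 1 - p).toNat ≤ fuel) :
    (pvExpand [1] (pvFacLoop fuel m p)).Nodup ∧
      ∀ d, d ∈ pvExpand [1] (pvFacLoop fuel m p) ↔ (1 ≤ d ∧ d ∣ m) := by
  induction fuel generalizing m p with
  | zero =>
    rw [pvFacLoop]
    have hmp : m < p := by omega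
    exact pvFacLoop_exit m p hm hp (by nlinarith) hnd
  | succ fuel ih =>
    rw [pvFacLoop]
    split
    · next hpp =>
      split
      · next hmod =>
        -- p divides m: strip p^f, recurse on the cofactor r
        have hd : p ∣ m := (PySem.Int.mod_eq_zero_iff_dvd m p).mp (by simpa using hmod)
        obtain ⟨f, r, hstrip, hmr, hr1, hnpr⟩ :=
          pvStrip_spec m.toNat m p 0 hp hm (le_refl m.toNat)
        have hrdvd : r ∣ m := ⟨p ^ f, by rw [hmr]; ring⟩
        have hrm : r ≤ m := Int.le_of_dvd (by omega) hrdvd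
        have hple : p ≤ m := le_trans (le_mul_of_one_le_left (by omega) (by omega)) hpp
        have hnd_r : ∀ q, 2 ≤ q → q < p + 1 → ¬ q ∣ r := by
          intro q h2 hlt hqr
          by_cases hqp : q < p
          · exact hnd q h2 hqp (hqr.trans hrdvd)
          · have : q = p := by omega
            exact hnpr (this ▸ hqr)
        have hPrime : Prime p := by
          rw [Int.prime_iff_natAbs_prime]
          rw [Nat.prime_def_lt]
          constructor
          · omega
          · intro q hq hqp
            by_contra hq1
            have hq0 : q ≠ 0 := by
              intro h0
              rw [h0] at hqp
              have := Nat.eq_zero_of_zero_dvd hqp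
              omega
            have hq2 : 2 ≤ q := by omega
            have hqi : (q : Int) ∣ p := by
              have : (q : Int) ∣ (p.natAbs : Int) := Int.natCast_dvd_natCast.mpr hqp
              rwa [Int.natAbs_of_nonneg (by omega)] at this
            exact hnd q (by exact_mod_cast hq2) (by omega) (hqi.trans hd)
        obtain ⟨ihnd, ihmem⟩ := ih r (p + 1) hr1 (by omega) hnd_r (by omega)
        -- rewrite the head entry using the strip spec and expand
        rw [hstrip]
        simp only []
        rw [pvExpand_cons, pvExpand_distrib]
        have hrange : PySem.List.pyRange 0 ((0 + (f : Int)) + 1) 1 =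
            (List.range (f + 1)).map (fun k : Nat => (k : Int)) := by
          rw [show (0 + (f : Int)) + 1 = ((f + 1 : Nat) : Int) by push_cast; ring]
          exact PySem.List.pyRange_zero_natCast (f + 1)
        have hD0 : ([1] : List Int).flatMap
            (fun d => (PySem.List.pyRange 0 ((0 + (f : Int)) + 1) 1).map
              (fun k => d * ((p, 0 + (f : Int)).1) ^ k.toNat)) =
            (List.range (f + 1)).map (fun k : Nat => p ^ k) := by
          rw [hrange]
          simp [List.map_map, Function.comp]
        rw [hD0]
        have hnoy : ∀ y ∈ pvExpand [1] (pvFacLoop fuel r (p + 1)), ¬ p ∣ y := by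
          intro y hy hpy
          obtain ⟨hy1, hyr⟩ := (ihmem y).mp hy
          exact hnpr (hpy.trans hyr)
        constructor
        · -- Nodup of the flatMap
          rw [List.flatMap_map, List.nodup_flatMap]
          constructor
          · intro k _
            exact ihnd.map (fun a b hab =>
              mul_left_cancel₀ (pow_ne_zero k (by omega : p ≠ 0)) hab)
          · have hplt : (List.range (f + 1)).Pairwise (· < ·) := List.pairwise_lt_range
            refine hplt.imp ?_
            intro k k' hkk d hd1 hd2
            simp only [List.mem_map] at hd1 hd2
            obtain ⟨y, hy, hdy⟩ := hd1
            obtain ⟨y', hy', hdy'⟩ := hd2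
            have := pvPowMulInj p hp (hnoy y hy) (hnoy y' hy') (by rw [hdy, hdy'])
            omega
        · -- membership
          intro d
          rw [List.flatMap_map]
          simp only [List.mem_flatMap, List.mem_map, List.mem_range]
          constructor
          · rintro ⟨k, hk, y, hy, rfl⟩
            obtain ⟨hy1, hyr⟩ := (ihmem y).mp hy
            have hpk : (1:Int) ≤ p ^ k := one_le_pow₀ (by omega : (1:Int) ≤ p)
            refine ⟨by nlinarith, ?_⟩
            rw [hmr]
            exact mul_dvd_mul (pow_dvd_pow p (by omega)) hyr
          · rintro ⟨hd1, hdm⟩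
            rw [hmr] at hdm
            obtain ⟨k, hk, y, hy1, hyr, rfl⟩ :=
              (pvPowMulDvd p r d hp hPrime hnpr hr1 f hd1).mp hdm
            exact ⟨k, by omega, y, (ihmem y).mpr ⟨hy1, hyr⟩, rfl⟩
      · next hmod =>
        -- p does not divide m: move to p + 1
        have hple : p ≤ m := le_trans (le_mul_of_one_le_left (by omega) (by omega)) hpp
        have hnd' : ∀ q, 2 ≤ q → q < p + 1 → ¬ q ∣ m := by
          intro q h2 hlt hqm
          by_cases hqp : q < p
          · exact hnd q h2 hqp hqm
          · have : q = p := by omega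
            subst this
            exact hmod (by simp [(PySem.Int.mod_eq_zero_iff_dvd m q).mpr hqm])
        exact ih m (p + 1) hm (by omega) hnd' (by omega)
    · next hpp =>
      exact pvFacLoop_exit m p hm hp (by omega) hnd

-- ===== VERDICT (by name: the statement is the Claim_ definition above) =====
theorem ordered_divisor_pairs_py_spec : Claim_equal_ordered_divisor_pairs_py := by
  intro n _
  unfold Spec_ordered_divisor_pairs_py
  rw [ordered_divisor_pairs_py, pvLoopA_eq n 1 (by omega), ordered_divisor_pairs_py_alt]
  by_cases hn : n ≤ 0
  · rw [if_pos hn, PySem.List.pyRange_one_eq_nil (by omega : n + 1 ≤ 1)]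
    simp
  · rw [if_neg hn]
    have hn1 : 1 ≤ n := by omega
    obtain ⟨hnodup, hmem⟩ := pvFacLoop_spec n.toNat n 2 hn1 (le_refl 2) (by intro q h2 hlt; omega) (by omega)
    -- the target ascending list: A's filtered range
    set ys := (PySem.List.pyRange 1 (n + 1) 1).filter
      (fun j => decide (j * j ≤ n) && (PySem.Int.mod n j == 0)) with hys
    have hys_pw : ys.Pairwise (fun a b : Int => a < b) :=
      (PySem.List.pairwise_lt_pyRange_one 1 (n + 1)).filter _
    have hys_nodup : ys.Nodup := hys_pw.imp (fun h => by omega)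
    have hxs_nodup : ((pvExpand [1] (pvFacLoop n.toNat n 2)).filter
        (fun d => decide (d * d ≤ n))).Nodup := hnodup.filter _
    have hsorted : PySem.List.sorted
        ((pvExpand [1] (pvFacLoop n.toNat n 2)).filter (fun d => decide (d * d ≤ n)))
        (fun x => x) false = ys := by
      apply PySem.List.sorted_eq_of_perm_of_pairwise_lt
      · rw [List.perm_ext_iff_of_nodup hys_nodup hxs_nodup]
        intro j
        rw [hys]
        simp only [List.mem_filter, PySem.List.mem_pyRange_one, Bool.and_eq_true,
          decide_eq_true_eq, beq_iff_eq, hmem j]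
        constructor
        · rintro ⟨⟨h1, h2⟩, h3, h4⟩
          exact ⟨⟨h1, (PySem.Int.mod_eq_zero_iff_dvd n j).mp h4⟩, h3⟩
        · rintro ⟨⟨h1, h2⟩, h3⟩
          have hle : j ≤ n := Int.le_of_dvd (by omega) h2
          exact ⟨⟨h1, by omega⟩, h3, (PySem.Int.mod_eq_zero_iff_dvd n j).mpr h2⟩
      · exact hys_pw
    exact (congrArg (List.map (fun b => (PySem.Int.floordiv n b, b))) hsorted).symm
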